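-- pv_equiv track=rewrite | github.com/chanjin1998/Algoritms | 프로그래머스/1/142086. 가장 가까운 같은 글자/가장 가까운 같은 글자.py | solution
-- ===== SOURCE A (Python) =====
-- def solution(s):
--     result = [-1]
--     for i in range(1,len(s)):
--         answer = 0
--         for j in range(i):
--             if s[i] == s[j]:
--                 answer = i - j
--             else:
--                 pass
--         if answer == 0:
--             result.append(-1)
--         else:
--             result.append(answer)
--     return result
-- ===== SOURCE B (Python) =====
-- def solution(s):
--     last = {}
--     result = []
--     for i, c in enumerate(s):
--         result.append(i - last[c] if c in last else -1)
--         last[c] = i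
--     return result
-- ===== Notes on version B (the rewrite author's own statement) =====
-- stated objective: faster
-- what changed: replaces the quadratic rescan of the whole prefix for every position by a single pass that keeps the last-seen index of each character in a dict
-- intended difference: on the empty string A returns [-1] (the seeded first element survives even though there is no character) while B returns [], the intended empty answer list for an empty input — e.g. on solution(""): A returns [-1], B returns []
import Mathlib
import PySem

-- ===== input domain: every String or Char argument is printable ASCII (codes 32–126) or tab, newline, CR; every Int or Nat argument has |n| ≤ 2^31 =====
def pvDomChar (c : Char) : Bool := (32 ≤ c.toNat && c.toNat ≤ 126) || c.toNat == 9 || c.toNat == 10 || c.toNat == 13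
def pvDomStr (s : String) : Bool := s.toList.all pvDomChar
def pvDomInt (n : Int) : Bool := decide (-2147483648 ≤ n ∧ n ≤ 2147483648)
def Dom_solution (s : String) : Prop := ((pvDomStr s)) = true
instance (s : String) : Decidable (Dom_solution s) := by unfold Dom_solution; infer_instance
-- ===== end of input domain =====

-- B replaces A's quadratic prefix rescan by one pass with a last-seen-index dict (measured faster);
-- on the empty string A returns [-1] and B returns [] (see D_solution).

-- ===== PORT A =====
def solutionLoop (cs : List Char) : List Int :=
  (PySem.List.pyRange 1 (cs.length : Int) 1).foldl (fun result i =>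
    let answer : Int := (PySem.List.pyRange 0 i 1).foldl (fun answer j =>
      if PySem.List.pyGetD cs i ' ' == PySem.List.pyGetD cs j ' ' then i - j else answer) 0
    if answer == 0 then result ++ [-1] else result ++ [answer]) [-1]

def solution (s : String) : List Int := solutionLoop s.toList

-- ===== PORT B =====
def altStep (acc : List Int × PySem.Dict Char Int) (p : Int × Char) : List Int × PySem.Dict Char Int :=
  (acc.1 ++ [match acc.2.get? p.2 with | some j => p.1 - j | none => -1],
   acc.2.insert p.2 p.1)

def solution_alt (s : String) : List Int :=
  ((PySem.List.enumerate s.toList 0).foldl altStep ([], PySem.Dict.empty)).1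

-- ===== PRECONDITION & SPEC =====
-- On the empty string A returns [-1] (its seeded first element survives with no character to
-- justify it) while B returns [], the intended answer list for an empty input.
def D_solution (s : String) : Prop := s = ""
instance (s : String) : Decidable (D_solution s) := by unfold D_solution; infer_instance

def Spec_solution (s : String) (out : List Int) : Prop := ¬ D_solution s → out = solution_alt s
instance (s : String) (out : List Int) : Decidable (Spec_solution s out) := by unfold Spec_solution; infer_instance

def pvDiffWitness_solution : String := ""
def pvDiffWitnessOut_solution : (List Int) × (List Int) := ([-1], [])

-- ===== CLAIM (what is proved, stated in full; the proofs are below) =====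
def Claim_unchanged_solution : Prop := ∀ (s : String), Dom_solution s → Spec_solution s (solution s)
def Claim_changed_solution : Prop := Dom_solution (pvDiffWitness_solution) ∧ D_solution (pvDiffWitness_solution) ∧ solution (pvDiffWitness_solution) = pvDiffWitnessOut_solution.1 ∧ solution_alt (pvDiffWitness_solution) = pvDiffWitnessOut_solution.2 ∧ pvDiffWitnessOut_solution.1 ≠ pvDiffWitnessOut_solution.2
def Claim_exact_solution : Prop := ∀ (s : String), Dom_solution s → D_solution s → solution s ≠ solution_alt s

-- ===== LEMMAS AND PROOFS =====

def altPair (cs : List Char) : List Int × PySem.Dict Char Int :=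
  (PySem.List.enumerate cs 0).foldl altStep ([], PySem.Dict.empty)

/-- the last index recorded for `tc` while scanning `ps`, starting from `o` -/
def lastIdx (ps : List (Int × Char)) (tc : Char) (o : Option Int) : Option Int :=
  ps.foldl (fun o p => if tc == p.2 then some p.1 else o) o

def optVal (i : Int) (o : Option Int) : Int :=
  match o with | some j => i - j | none => 0

lemma altPair_snd (ps : List (Int × Char)) (r : List Int) (d : PySem.Dict Char Int) :
    (ps.foldl altStep (r, d)).2 = ps.foldl (fun d p => d.insert p.2 p.1) d := by
  induction ps generalizing r d with
  | nil => rfl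
  | cons p ps ih => simpa [altStep] using ih _ _

lemma dict_get_foldl (ps : List (Int × Char)) (d : PySem.Dict Char Int) (tc : Char) :
    (ps.foldl (fun d p => d.insert p.2 p.1) d).get? tc = lastIdx ps tc (d.get? tc) := by
  induction ps generalizing d with
  | nil => rfl
  | cons p ps ih =>
    simp only [List.foldl_cons, lastIdx] at *
    rw [ih]
    congr 1
    by_cases h : tc = p.2
    · subst h; simp [PySem.Dict.get?_insert_self]
    · simp [PySem.Dict.get?_insert_of_ne _ _ h, h]

lemma inner_fold_eq (ps : List (Int × Char)) (i : Int) (tc : Char) (o : Option Int) :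
    ps.foldl (fun a p => if tc == p.2 then i - p.1 else a) (optVal i o)
      = optVal i (lastIdx ps tc o) := by
  induction ps generalizing o with
  | nil => rfl
  | cons p ps ih =>
    simp only [List.foldl_cons, lastIdx] at *
    rw [← ih]
    congr 1
    by_cases h : tc == p.2 <;> simp [h, optVal]

lemma lastIdx_bound (ps : List (Int × Char)) (tc : Char) (o : Option Int) (P : Int → Prop)
    (h0 : ∀ j, o = some j → P j) (hps : ∀ p ∈ ps, P p.1) :
    ∀ j, lastIdx ps tc o = some j → P j := by
  induction ps generalizing o with
  | nil => exact h0
  | cons p ps ih =>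
    intro j hj
    refine ih _ ?_ (fun q hq => hps q (List.mem_cons_of_mem _ hq)) j hj
    intro j' hj'
    by_cases h : tc == p.2
    · simp [h] at hj'; subst hj'; exact hps p List.mem_cons_self
    · simp [h] at hj'; exact h0 _ hj'

lemma altPair_snoc (cs : List Char) (c : Char) :
    altPair (cs ++ [c]) = altStep (altPair cs) ((cs.length : Int), c) := by
  simp [altPair, PySem.List.enumerate_append, List.foldl_append, PySem.List.enumerate_cons,
    PySem.List.enumerate_nil]

lemma pyGetD_append_left (cs : List Char) (c : Char) (i : Int) (h0 : 0 ≤ i)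
    (h1 : i < (cs.length : Int)) :
    PySem.List.pyGetD (cs ++ [c]) i ' ' = PySem.List.pyGetD cs i ' ' := by
  rw [PySem.List.pyGetD_eq_getElem (cs ++ [c]) ' ' h0 (by simp; omega),
      PySem.List.pyGetD_eq_getElem cs ' ' h0 h1]
  apply List.getElem_append_left

lemma main_lemma (cs : List Char) (h : cs ≠ []) :
    solutionLoop cs = (altPair cs).1 := by
  induction cs using List.reverseRecOn with
  | nil => exact absurd rfl h
  | append_singleton cs c ih =>
    by_cases hnil : cs = []
    · subst hnil
      simp [solutionLoop, altPair, PySem.List.enumerate_cons, PySem.List.enumerate_nil,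
        altStep, PySem.List.pyRange_one_eq_nil, PySem.Dict.get?_empty]
    · have hn : 1 ≤ (cs.length : Int) := by
        have := List.length_pos_iff.mpr hnil; omega
      rw [altPair_snoc]
      have hlen : ((cs ++ [c]).length : Int) = (cs.length : Int) + 1 := by simp
      have hsplit : PySem.List.pyRange 1 ((cs ++ [c]).length : Int) 1
          = PySem.List.pyRange 1 (cs.length : Int) 1 ++ [(cs.length : Int)] := by
        rw [hlen, PySem.List.pyRange_one_succ_right (by omega)]
      unfold solutionLoop
      rw [hsplit, List.foldl_append]
      have hcongr : (PySem.List.pyRange 1 (cs.length : Int) 1).foldl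
          (fun result i =>
            let answer : Int := (PySem.List.pyRange 0 i 1).foldl (fun answer j =>
              if PySem.List.pyGetD (cs ++ [c]) i ' ' == PySem.List.pyGetD (cs ++ [c]) j ' '
              then i - j else answer) 0
            if answer == 0 then result ++ [-1] else result ++ [answer]) [-1]
          = solutionLoop cs := by
        unfold solutionLoop
        refine PySem.List.foldl_congr_mem _ _ _ _ (fun acc i hi => ?_)
        rw [PySem.List.mem_pyRange_one] at hi
        have hgi := pyGetD_append_left cs c i (by omega) (by omega)
        have hinner : (PySem.List.pyRange 0 i 1).foldl (fun answer j =>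
            if PySem.List.pyGetD (cs ++ [c]) i ' ' == PySem.List.pyGetD (cs ++ [c]) j ' '
            then i - j else answer) 0
            = (PySem.List.pyRange 0 i 1).foldl (fun answer j =>
            if PySem.List.pyGetD cs i ' ' == PySem.List.pyGetD cs j ' '
            then i - j else answer) 0 := by
          refine PySem.List.foldl_congr_mem _ _ _ _ (fun a j hj => ?_)
          rw [PySem.List.mem_pyRange_one] at hj
          rw [hgi, pyGetD_append_left cs c j (by omega) (by omega)]
        simp only [hinner]
      rw [hcongr, ih hnil, List.foldl_cons, List.foldl_nil]
      have hgc : PySem.List.pyGetD (cs ++ [c]) (cs.length : Int) ' ' = c := by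
        rw [PySem.List.pyGetD_eq_getElem _ ' ' (by omega) (by simp)]
        simp
      have hget : (altPair cs).2.get? c = lastIdx (PySem.List.enumerate cs 0) c none := by
        rw [altPair, altPair_snd, dict_get_foldl, PySem.Dict.get?_empty]
      have hF : (PySem.List.pyRange 0 (cs.length : Int) 1).foldl (fun answer j =>
          if PySem.List.pyGetD (cs ++ [c]) (cs.length : Int) ' ' == PySem.List.pyGetD (cs ++ [c]) j ' '
          then (cs.length : Int) - j else answer) 0
          = optVal (cs.length : Int) (lastIdx (PySem.List.enumerate cs 0) c none) := by
        have h1 : (PySem.List.pyRange 0 (cs.length : Int) 1).foldl (fun answer j =>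
            if PySem.List.pyGetD (cs ++ [c]) (cs.length : Int) ' ' == PySem.List.pyGetD (cs ++ [c]) j ' '
            then (cs.length : Int) - j else answer) 0
            = (PySem.List.enumerate cs 0).foldl (fun a p =>
                if c == p.2 then (cs.length : Int) - p.1 else a) 0 := by
          rw [PySem.List.enumerate_eq_map_pyRange (d := ' '), List.foldl_map]
          simp only [PySem.List.len_eq]
          refine PySem.List.foldl_congr_mem _ _ _ _ (fun a j hj => ?_)
          rw [PySem.List.mem_pyRange_one] at hj
          rw [hgc, pyGetD_append_left cs c j (by omega) (by omega)]
        rw [h1]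
        exact inner_fold_eq (PySem.List.enumerate cs 0) (cs.length : Int) c none
      show (let answer := _; if answer == 0 then _ else _) = _
      simp only [hF, altStep, hget]
      cases ho : lastIdx (PySem.List.enumerate cs 0) c none with
      | none => simp [optVal]
      | some j =>
        have hjb : 0 ≤ j ∧ j < (cs.length : Int) := by
          refine lastIdx_bound (PySem.List.enumerate cs 0) c none
            (fun j => 0 ≤ j ∧ j < (cs.length : Int)) (by simp) ?_ j ho
          intro p hp
          rw [PySem.List.mem_enumerate_iff] at hp
          obtain ⟨k, hk, rfl⟩ := hp
          constructor
          · simp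
          · simpa using (by exact_mod_cast hk : ((k : Int) < (cs.length : Int)))
        simp only [optVal]
        rw [if_neg (by simp; omega)]

-- ===== VERDICT (by name: the statement is the Claim_ definition above) =====
theorem solution_spec : Claim_unchanged_solution := by
  intro s _ hD
  have hnil : s.toList ≠ [] := by
    intro h
    exact hD (by unfold D_solution; exact String.ext (by simpa using h))
  unfold solution solution_alt
  rw [main_lemma s.toList hnil]
  rfl

theorem solution_changed : Claim_changed_solution := by
  unfold Claim_changed_solution; decide

theorem solution_tight : Claim_exact_solution := by
  intro s _ hD
  unfold D_solution at hD
  subst hD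
  decide
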